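-- pv_equiv track=rewrite | github.com/Dawnflash/contacto | contacto/helpers.py | parse_refspec
-- ===== SOURCE A (Python) =====
-- def parse_refspec(rspec):
--     if not rspec:
--         return [None, None, None]
--     toks = rspec.split('/')
--     ln = len(toks)
--     if ln > 3:
--         raise Exception('REFSPEC: [GROUP][/[ENTITY][/[ATTRIBUTE]]]')
--     toks = [None if tok == '' else tok for tok in toks]
--     for _ in range(3 - ln):
--         toks.append(None)
--     return toks
-- ===== SOURCE B (Python) =====
-- def parse_refspec(rspec):
--     if not rspec:
--         return [None, None, None]
--     toks = [None, None, None]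
--     slot = 0
--     cur = ''
--     for ch in rspec:
--         if ch == '/':
--             if slot == 2:
--                 raise Exception('REFSPEC: [GROUP][/[ENTITY][/[ATTRIBUTE]]]')
--             if cur:
--                 toks[slot] = cur
--             slot += 1
--             cur = ''
--         else:
--             cur += ch
--     if cur:
--         toks[slot] = cur
--     return toks
-- ===== Notes on version B (the rewrite author's own statement) =====
-- stated objective: alternative
-- what changed: B replaces A's staged passes (split on '/', length check, empty-to-None comprehension, pad loop) by a single character-by-character pass that writes tokens directly into a fixed three-slot list and raises the same exception when a slash is seen while the last slot is open.
import Mathlib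
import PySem

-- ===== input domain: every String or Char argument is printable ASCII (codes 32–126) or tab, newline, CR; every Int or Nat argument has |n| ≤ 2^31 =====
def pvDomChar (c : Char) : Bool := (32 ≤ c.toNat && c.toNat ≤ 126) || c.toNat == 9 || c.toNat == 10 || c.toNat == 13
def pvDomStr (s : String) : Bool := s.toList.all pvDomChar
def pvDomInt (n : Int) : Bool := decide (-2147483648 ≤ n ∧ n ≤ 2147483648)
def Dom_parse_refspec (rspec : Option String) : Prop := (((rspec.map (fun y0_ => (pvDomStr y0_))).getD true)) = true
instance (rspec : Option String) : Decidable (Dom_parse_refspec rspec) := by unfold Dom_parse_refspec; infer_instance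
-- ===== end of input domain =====

-- B replaces A's staged passes (split, length check, None-mapping, pad loop) by one
-- character-by-character pass writing into a fixed three-slot list (objective: alternative).

-- ===== PORT A =====
def pvOptTok (t : List Char) : Option String :=
  if t = [] then none else some (String.ofList t)

def parse_refspec (rspec : Option String) : List (Option String) :=
  match rspec with
  | none => [none, none, none]
  | some s =>
    let cs := s.toList
    if cs = [] then [none, none, none]
    else
      let toks := PySem.Chars.splitOn cs ['/']
      if toks.length > 3 then []  -- Python raises Exception here; excluded by Pre_
      else
        (toks.map pvOptTok) ++ List.replicate (3 - toks.length) none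

-- ===== PORT B =====
-- the for-loop of Source B: state = (toks, slot, cur); 'none' result = the raise (excluded by Pre_)
def bGo (cs : List Char) (toks : List (Option String)) (slot : Nat) (cur : List Char) :
    Option (List (Option String)) :=
  match cs with
  | [] => some (if cur ≠ [] then toks.set slot (some (String.ofList cur)) else toks)
  | c :: rest =>
    if c = '/' then
      if slot = 2 then none  -- raise Exception('REFSPEC: ...')
      else bGo rest (if cur ≠ [] then toks.set slot (some (String.ofList cur)) else toks) (slot + 1) []
    else bGo rest toks slot (cur ++ [c])

def parse_refspec_alt (rspec : Option String) : List (Option String) :=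
  match rspec with
  | none => [none, none, none]
  | some s =>
    let cs := s.toList
    if cs = [] then [none, none, none]
    else
      match bGo cs [none, none, none] 0 [] with
      | none => []  -- the raise path; excluded by Pre_
      | some toks => toks

-- ===== PRECONDITION & SPEC =====
-- Pre_ excludes exactly the inputs on which A raises Exception: strings containing more than two slash separators.
def Pre_parse_refspec (rspec : Option String) : Prop :=
  ((rspec.getD "").toList.count '/') ≤ 2
instance (rspec : Option String) : Decidable (Pre_parse_refspec rspec) := by unfold Pre_parse_refspec; infer_instance

def pvWitness_parse_refspec : Option String := some "grp/ent/attr"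

def Spec_parse_refspec (rspec : Option String) (out : List (Option String)) : Prop := out = parse_refspec_alt rspec
instance (rspec : Option String) (out : List (Option String)) : Decidable (Spec_parse_refspec rspec out) := by unfold Spec_parse_refspec; infer_instance

-- ===== CLAIM (what is proved, stated in full; the proofs are below) =====
def Claim_equal_parse_refspec : Prop := ∀ (rspec : Option String), Dom_parse_refspec rspec → Pre_parse_refspec rspec → Spec_parse_refspec rspec (parse_refspec rspec)

-- ===== LEMMAS AND PROOFS =====

-- structural split on '/', the shape splitOn.go computes
def splitSlash : List Char → List (List Char)
  | [] => [[]]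
  | c :: rest =>
    if c = '/' then [] :: splitSlash rest
    else
      match splitSlash rest with
      | t :: ts => (c :: t) :: ts
      | [] => [[c]]

theorem splitSlash_ne_nil (cs : List Char) : splitSlash cs ≠ [] := by
  induction cs with
  | nil => simp [splitSlash]
  | cons c rest ih =>
    simp only [splitSlash]
    split
    · simp
    · cases h : splitSlash rest with
      | nil => simp
      | cons t ts => simp

theorem splitSlash_length (cs : List Char) :
    (splitSlash cs).length = cs.count '/' + 1 := by
  induction cs with
  | nil => simp [splitSlash]
  | cons c rest ih =>
    simp only [splitSlash]
    by_cases hc : c = '/'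
    · subst hc; simp [ih]
    · rw [if_neg hc]
      cases h : splitSlash rest with
      | nil => exact absurd h (splitSlash_ne_nil rest)
      | cons t ts =>
        rw [h] at ih
        have hcnt : (c :: rest).count '/' = rest.count '/' := by
          simp [hc]
        rw [hcnt]
        simp only [List.length_cons] at ih ⊢
        omega

def modHead (f : List Char → List Char) : List (List Char) → List (List Char)
  | [] => []
  | t :: ts => f t :: ts

theorem go_eq_splitSlash (fuel : Nat) (l cur : List Char) (acc : List (List Char))
    (h : l.length < fuel) :
    PySem.Chars.splitOn.go ['/'] fuel l cur acc
      = acc.reverse ++ modHead (cur.reverse ++ ·) (splitSlash l) := by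
  induction fuel generalizing l cur acc with
  | zero => omega
  | succ fuel ih =>
    cases l with
    | nil => simp [PySem.Chars.splitOn.go, splitSlash, modHead]
    | cons c rest =>
      simp only [PySem.Chars.splitOn.go]
      by_cases hc : c = '/'
      · subst hc
        simp only [List.isPrefixOf, beq_self_eq_true, Bool.and_true,
          if_pos]
        rw [ih _ _ _ (by simpa using Nat.lt_of_succ_lt_succ h)]
        simp only [splitSlash, modHead, List.reverse_nil, List.nil_append]
        cases hs : splitSlash rest with
        | nil => exact absurd hs (splitSlash_ne_nil rest)
        | cons t ts => simp [hs]
      · have hp : ['/'].isPrefixOf (c :: rest) = false := by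
          simp [List.isPrefixOf]
          intro hh
          exact absurd hh.symm hc
        rw [hp]
        simp only [Bool.false_eq_true, if_false]
        rw [ih rest (c :: cur) acc (by simpa using Nat.lt_of_succ_lt_succ h)]
        simp only [splitSlash, hc, if_false]
        cases hs : splitSlash rest with
        | nil => exact absurd hs (splitSlash_ne_nil rest)
        | cons t ts => simp [modHead]

theorem splitOn_eq_splitSlash (cs : List Char) :
    PySem.Chars.splitOn cs ['/'] = splitSlash cs := by
  rw [PySem.Chars.splitOn, go_eq_splitSlash _ _ _ _ (by omega)]
  cases h : splitSlash cs with
  | nil => exact absurd h (splitSlash_ne_nil cs)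
  | cons t ts => simp [modHead]

-- abstract 'fill the slots from index slot onwards with these tokens'
def place (toks : List (Option String)) (slot : Nat) : List (List Char) → List (Option String)
  | [] => toks
  | t :: ts => place (if t ≠ [] then toks.set slot (some (String.ofList t)) else toks) (slot + 1) ts

theorem bGo_spec (cs : List Char) (toks : List (Option String)) (slot : Nat) (cur : List Char)
    (hslot : slot ≤ 2) :
    bGo cs toks slot cur =
      if 2 < slot + cs.count '/' then none
      else some (place toks slot (modHead (cur ++ ·) (splitSlash cs))) := by
  induction cs generalizing toks slot cur with
  | nil =>
    have h : ¬ 2 < slot + List.count '/' ([] : List Char) := by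
      simp only [List.count_nil]; omega
    rw [if_neg h]
    simp only [bGo, splitSlash, modHead, List.append_nil, place]
  | cons c rest ih =>
    by_cases hc : c = '/'
    · subst hc
      have hstep : bGo ('/' :: rest) toks slot cur
          = if slot = 2 then none
            else bGo rest (if cur ≠ [] then toks.set slot (some (String.ofList cur)) else toks)
                   (slot + 1) [] := by
        simp [bGo]
      have hcnt : List.count '/' ('/' :: rest) = rest.count '/' + 1 := by
        simp
      rw [hstep]
      simp only [hcnt]
      by_cases h2 : slot = 2
      · subst h2
        rw [if_pos rfl, if_pos (by omega)]
      · rw [if_neg h2, ih _ _ _ (by omega)]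
        by_cases hb : 2 < slot + (rest.count '/' + 1)
        · rw [if_pos (by omega), if_pos hb]
        · rw [if_neg (by omega), if_neg hb]
          congr 1
          simp only [splitSlash]
          cases hs : splitSlash rest with
          | nil => exact absurd hs (splitSlash_ne_nil rest)
          | cons t ts => simp [modHead, place]
    · have hstep : bGo (c :: rest) toks slot cur = bGo rest toks slot (cur ++ [c]) := by
        simp [bGo, hc]
      have hcnt : List.count '/' (c :: rest) = rest.count '/' := by
        simp [hc]
      rw [hstep, ih _ _ _ hslot]
      simp only [hcnt]
      split
      · rfl
      · congr 1
        simp only [splitSlash, if_neg hc]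
        cases hs : splitSlash rest with
        | nil => exact absurd hs (splitSlash_ne_nil rest)
        | cons t ts => simp [modHead]

-- on ≤ 3 tokens, B's slot-filling equals A's map-and-pad
theorem place_eq_pad (ts : List (List Char)) (h1 : ts ≠ []) (h3 : ts.length ≤ 3) :
    place [none, none, none] 0 ts = ts.map pvOptTok ++ List.replicate (3 - ts.length) none := by
  match ts, h3 with
  | [a], _ =>
    simp only [place, pvOptTok, List.map, List.length]
    by_cases ha : a = [] <;> simp [ha, List.replicate]
  | [a, b], _ =>
    simp only [place, pvOptTok, List.map, List.length]
    by_cases ha : a = [] <;> by_cases hb : b = [] <;> simp [ha, hb, List.replicate]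
  | [a, b, c], _ =>
    simp only [place, pvOptTok, List.map, List.length]
    by_cases ha : a = [] <;> by_cases hb : b = [] <;> by_cases hc : c = [] <;>
      simp [ha, hb, hc, List.replicate]
  | [], h => exact absurd rfl h1

-- ===== VERDICT (by name: the statement is the Claim_ definition above) =====
theorem parse_refspec_spec : Claim_equal_parse_refspec := by
  intro rspec _ hpre
  unfold Spec_parse_refspec
  match rspec with
  | none => rfl
  | some s =>
    simp only [parse_refspec, parse_refspec_alt]
    by_cases hne : s.toList = []
    · simp [hne]
    · simp only [hne, if_false]
      have hcount : s.toList.count '/' ≤ 2 := by simpa [Pre_parse_refspec] using hpre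
      have hlen := splitSlash_length s.toList
      rw [splitOn_eq_splitSlash, bGo_spec _ _ _ _ (by omega), if_neg (by omega),
        if_neg (by omega)]
      have hmod : modHead (([] : List Char) ++ ·) (splitSlash s.toList) = splitSlash s.toList := by
        cases hs : splitSlash s.toList with
        | nil => exact absurd hs (splitSlash_ne_nil s.toList)
        | cons t ts => simp [modHead]
      rw [hmod, place_eq_pad _ (splitSlash_ne_nil s.toList) (by omega)]
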